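-- pv_equiv track=rewrite | github.com/PeterL-Engineering/ESC180_Introduction_Computer_Programming | Exams/2023.py | list_sorter
-- ===== SOURCE A (Python) =====
-- def list_sorter(L, even_count = 0, second_count = 1):
--     if len(L) == 0:
--         return []
--
--     if second_count % 3 == 0:
--         if even_count % 2 == 0:
--             if L[0] % 2 == 0:
--                 return list_sorter(L[1:], even_count + 1, second_count + 1)
--             else:
--                 return [L[0]] + list_sorter(L[1:], even_count, second_count + 1)
--         else:
--             if L[0] % 2 == 0:
--                 return [L[0]] + list_sorter(L[1:], even_count + 1, second_count + 1)
--             else: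
--                 return [L[0]] + list_sorter(L[1:], even_count, second_count + 1)
--     else:
--         if L[0] % 2 == 0:
--             return list_sorter(L[1:], even_count + 1, second_count + 1)
--         else:
--             return [L[0]] + list_sorter(L[1:], even_count, second_count + 1)
-- ===== SOURCE B (Python) =====
-- def list_sorter(L, even_count = 0, second_count = 1):
--     res = []
--     for x in L:
--         if x % 2 != 0 or (second_count % 3 == 0 and even_count % 2 != 0):
--             res.append(x)
--         if x % 2 == 0:
--             even_count += 1
--         second_count += 1
--     return res
-- ===== Notes on version B (the rewrite author's own statement) =====
-- stated objective: faster
-- what changed: Replaces the recursion that re-slices L[1:] at every step (quadratic copying) with one iterative linear pass that appends kept elements while updating the two counters in place.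
import Mathlib
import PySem

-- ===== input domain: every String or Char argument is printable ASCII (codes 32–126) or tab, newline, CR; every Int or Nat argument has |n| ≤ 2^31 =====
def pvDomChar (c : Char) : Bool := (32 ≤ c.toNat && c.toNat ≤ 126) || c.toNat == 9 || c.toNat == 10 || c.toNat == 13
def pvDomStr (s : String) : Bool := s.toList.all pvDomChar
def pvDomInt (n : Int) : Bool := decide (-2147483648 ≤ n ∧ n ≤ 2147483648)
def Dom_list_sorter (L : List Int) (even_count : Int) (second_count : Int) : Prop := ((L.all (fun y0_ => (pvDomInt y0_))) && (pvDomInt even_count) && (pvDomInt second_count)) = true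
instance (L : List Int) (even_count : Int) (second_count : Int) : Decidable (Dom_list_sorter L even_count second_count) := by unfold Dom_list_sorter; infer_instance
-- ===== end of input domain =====

-- B replaces A's recursion over L[1:] slices with a single iterative linear pass (faster: O(n) vs O(n^2) slice copying).


-- ===== PORT A =====
-- recursion on the list (L[1:] of a nonempty list is its tail), branches in A's order
def list_sorter (L : List Int) (even_count : Int) (second_count : Int) : List Int :=
  match L with
  | [] => []
  | x :: rest =>
    if PySem.Int.mod second_count 3 = 0 then
      if PySem.Int.mod even_count 2 = 0 then
        if PySem.Int.mod x 2 = 0 then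
          list_sorter rest (even_count + 1) (second_count + 1)
        else
          x :: list_sorter rest even_count (second_count + 1)
      else
        if PySem.Int.mod x 2 = 0 then
          x :: list_sorter rest (even_count + 1) (second_count + 1)
        else
          x :: list_sorter rest even_count (second_count + 1)
    else
      if PySem.Int.mod x 2 = 0 then
        list_sorter rest (even_count + 1) (second_count + 1)
      else
        x :: list_sorter rest even_count (second_count + 1)

-- ===== PORT B =====
-- single pass: state = (result so far, even_count, second_count); one loop-body step
def sorterStep (st : List Int × Int × Int) (x : Int) : List Int × Int × Int :=
  ((if PySem.Int.mod x 2 ≠ 0 ∨ (PySem.Int.mod st.2.2 3 = 0 ∧ PySem.Int.mod st.2.1 2 ≠ 0) then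
      st.1 ++ [x]
    else st.1),
   (if PySem.Int.mod x 2 = 0 then st.2.1 + 1 else st.2.1),
   st.2.2 + 1)

def list_sorter_alt (L : List Int) (even_count : Int) (second_count : Int) : List Int :=
  (L.foldl sorterStep ([], even_count, second_count)).1

-- ===== PRECONDITION & SPEC =====
def Spec_list_sorter (L : List Int) (even_count : Int) (second_count : Int) (out : List Int) : Prop := out = list_sorter_alt L even_count second_count
instance (L : List Int) (even_count : Int) (second_count : Int) (out : List Int) : Decidable (Spec_list_sorter L even_count second_count out) := by unfold Spec_list_sorter; infer_instance

-- ===== CLAIM (what is proved, stated in full; the proofs are below) =====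
def Claim_equal_list_sorter : Prop := ∀ (L : List Int) (even_count : Int) (second_count : Int), Dom_list_sorter L even_count second_count → Spec_list_sorter L even_count second_count (list_sorter L even_count second_count)

-- ===== LEMMAS AND PROOFS =====

-- loop invariant: B's fold with any accumulator prefixes A's recursive result
theorem foldl_eq_list_sorter (L : List Int) (acc : List Int) (ec sc : Int) :
    (L.foldl sorterStep (acc, ec, sc)).1 = acc ++ list_sorter L ec sc := by
  induction L generalizing acc ec sc with
  | nil => simp [list_sorter]
  | cons x rest ih =>
    simp only [List.foldl_cons, list_sorter, sorterStep]
    split_ifs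
    all_goals try (exact ih ..)
    all_goals try (rw [ih]; simp)
    all_goals (clear ih; tauto)

theorem list_sorter_spec' (L : List Int) (ec sc : Int) :
    list_sorter L ec sc = list_sorter_alt L ec sc := by
  unfold list_sorter_alt
  rw [foldl_eq_list_sorter]
  simp

-- ===== VERDICT (by name: the statement is the Claim_ definition above) =====
theorem list_sorter_spec : Claim_equal_list_sorter := by
  intro L ec sc _
  unfold Spec_list_sorter
  exact list_sorter_spec' L ec sc
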